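-- pv_equiv track=rewrite | github.com/alphaonex86/CatchChallenger | test/testingclient.py | flag_combinations
-- ===== SOURCE A (Python) =====
-- ALWAYS_ON_IN_COMBOS  = ["CATCHCHALLENGER_EXTRA_CHECK"]
--
-- ALWAYS_OFF_IN_COMBOS = ["CATCHCHALLENGER_NOAUDIO", "NOWEBSOCKET"]
--
-- def flag_combinations(flags):
--     """Generate test flag combos.
--
--     Strategy:
--       * Empty combo () — baseline.
--       * Each flag in ALWAYS_ON_IN_COMBOS or ALWAYS_OFF_IN_COMBOS that is
--         present in `flags` is tested as a standalone single-flag combo.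
--       * The remaining ("base") flags are powerset-combined; for each
--         base subset we always add the ALWAYS_ON_IN_COMBOS flags that
--         appear in `flags` and never add the ALWAYS_OFF_IN_COMBOS flags.
--     """
--     separate = []
--     idx = 0
--     while idx < len(ALWAYS_ON_IN_COMBOS):
--         separate.append(ALWAYS_ON_IN_COMBOS[idx])
--         idx += 1
--     idx = 0
--     while idx < len(ALWAYS_OFF_IN_COMBOS):
--         separate.append(ALWAYS_OFF_IN_COMBOS[idx])
--         idx += 1
--
--     base_flags = []
--     on_in_combos = []
--     idx = 0
--     while idx < len(flags):
--         f = flags[idx]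
--         if f in ALWAYS_ON_IN_COMBOS:
--             on_in_combos.append(f)
--         elif f in ALWAYS_OFF_IN_COMBOS:
--             pass
--         else:
--             base_flags.append(f)
--         idx += 1
--
--     seen = set()
--     result = []
--
--     seen.add(tuple())
--     result.append(tuple())
--
--     idx = 0
--     while idx < len(flags):
--         f = flags[idx]
--         if f in separate:
--             combo = (f,)
--             if combo not in seen:
--                 seen.add(combo)
--                 result.append(combo)
--         idx += 1
--
--     n = len(base_flags)
--     i = 0
--     while i < (1 << n):
--         combo = []
--         j = 0
--         while j < n:
--             if i & (1 << j):
--                 combo.append(base_flags[j])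
--             j += 1
--         k = 0
--         while k < len(on_in_combos):
--             combo.append(on_in_combos[k])
--             k += 1
--         combo_tuple = tuple(combo)
--         if combo_tuple not in seen:
--             seen.add(combo_tuple)
--             result.append(combo_tuple)
--         i += 1
--
--     return result
-- ===== SOURCE B (Python) =====
-- ALWAYS_ON_IN_COMBOS  = ["CATCHCHALLENGER_EXTRA_CHECK"]
--
-- ALWAYS_OFF_IN_COMBOS = ["CATCHCHALLENGER_NOAUDIO", "NOWEBSOCKET"]
--
-- def flag_combinations(flags):
--     """Same combos as A, built by incremental doubling instead of bit masks."""
--     on = [f for f in flags if f in ALWAYS_ON_IN_COMBOS]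
--     base = [f for f in flags if f not in ALWAYS_ON_IN_COMBOS and f not in ALWAYS_OFF_IN_COMBOS]
--     separate = ALWAYS_ON_IN_COMBOS + ALWAYS_OFF_IN_COMBOS
--     subsets = [()]
--     for f in base:
--         subsets = subsets + [t + (f,) for t in subsets]
--     candidates = [()] + [(f,) for f in flags if f in separate] \
--                       + [t + tuple(on) for t in subsets]
--     return list(dict.fromkeys(candidates))
-- ===== Notes on version B (the rewrite author's own statement) =====
-- stated objective: simpler
-- what changed: The index-driven while loops become filters, the bit-mask powerset enumeration becomes incremental doubling of the subset list, and the threaded seen-set dedup becomes one final first-occurrence dedup (dict.fromkeys) over the concatenated candidate list.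
import Mathlib
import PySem

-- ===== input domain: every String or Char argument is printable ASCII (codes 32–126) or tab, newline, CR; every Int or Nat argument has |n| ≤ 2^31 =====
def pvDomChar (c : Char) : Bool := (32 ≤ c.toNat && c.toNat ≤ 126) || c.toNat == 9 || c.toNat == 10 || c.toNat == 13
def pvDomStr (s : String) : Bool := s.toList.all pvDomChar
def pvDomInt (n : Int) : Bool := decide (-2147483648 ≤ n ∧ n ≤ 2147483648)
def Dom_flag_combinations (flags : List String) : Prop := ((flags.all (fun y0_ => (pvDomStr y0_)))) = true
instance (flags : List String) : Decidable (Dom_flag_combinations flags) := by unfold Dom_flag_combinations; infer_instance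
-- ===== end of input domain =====

-- B replaces the bit-mask powerset loop by incremental doubling of the subset list and
-- the threaded `seen`-set dedup by one final first-occurrence dedup pass (simpler).

def pyAlwaysOn : List String := ["CATCHCHALLENGER_EXTRA_CHECK"]
def pyAlwaysOff : List String := ["CATCHCHALLENGER_NOAUDIO", "NOWEBSOCKET"]

-- ===== PORT A =====
-- A-side helper: one step of A's `seen`/`result` dedup (the `if combo not in seen` block)
def pvDedupStep (s : PySem.Set (List String) × List (List String)) (c : List String) :
    PySem.Set (List String) × List (List String) :=
  if PySem.Set.contains s.1 c then s else (PySem.Set.add s.1 c, s.2 ++ [c])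

def flag_combinations (flags : List String) : List (List String) :=
  -- the two `separate.append(...)` index loops
  let separate := (List.range pyAlwaysOn.length).foldl
      (fun acc idx => acc ++ [pyAlwaysOn.getD idx ""]) []
  let separate := (List.range pyAlwaysOff.length).foldl
      (fun acc idx => acc ++ [pyAlwaysOff.getD idx ""]) separate
  -- the classification index loop building (base_flags, on_in_combos)
  let cls := (List.range flags.length).foldl
      (fun (p : List String × List String) idx =>
        let f := flags.getD idx ""
        if pyAlwaysOn.contains f then (p.1, p.2 ++ [f])
        else if pyAlwaysOff.contains f then p
        else (p.1 ++ [f], p.2)) ([], [])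
  let base_flags := cls.1
  let on_in_combos := cls.2
  -- seen = {()}; result = [()]
  let st : PySem.Set (List String) × List (List String) :=
    (PySem.Set.add PySem.Set.empty [], [[]])
  -- the singleton index loop
  let st := (List.range flags.length).foldl
      (fun st idx =>
        let f := flags.getD idx ""
        if separate.contains f then pvDedupStep st [f] else st) st
  -- the bit-mask powerset loop
  let n := base_flags.length
  let st := (List.range (2 ^ n)).foldl
      (fun st i =>
        let combo := (List.range n).foldl
            (fun c j => if i.testBit j then c ++ [base_flags.getD j ""] else c) []
        let combo := (List.range on_in_combos.length).foldl
            (fun c k => c ++ [on_in_combos.getD k ""]) combo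
        pvDedupStep st combo) st
  st.2

-- ===== PORT B =====
def flag_combinations_alt (flags : List String) : List (List String) :=
  let on := flags.filter (fun f => pyAlwaysOn.contains f)
  let base := flags.filter (fun f => !pyAlwaysOn.contains f && !pyAlwaysOff.contains f)
  let separate := pyAlwaysOn ++ pyAlwaysOff
  let subsets := base.foldl (fun ss f => ss ++ ss.map (fun t => t ++ [f])) [[]]
  let candidates := [[]] ++ (flags.filter (fun f => separate.contains f)).map (fun f => [f])
      ++ subsets.map (fun t => t ++ on)
  PySem.List.dedup candidates   -- list(dict.fromkeys(candidates))

-- ===== PRECONDITION & SPEC =====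
def Spec_flag_combinations (flags : List String) (out : List (List String)) : Prop := out = flag_combinations_alt flags
instance (flags : List String) (out : List (List String)) : Decidable (Spec_flag_combinations flags out) := by unfold Spec_flag_combinations; infer_instance

-- ===== CLAIM (what is proved, stated in full; the proofs are below) =====
def Claim_equal_flag_combinations : Prop := ∀ (flags : List String), Dom_flag_combinations flags → Spec_flag_combinations flags (flag_combinations flags)

-- ===== LEMMAS AND PROOFS =====

-- an index loop reading l.getD is a loop over l
theorem map_getD_range {α : Type} (l : List α) (d : α) :
    (List.range l.length).map (fun i => l.getD i d) = l := by
  apply List.ext_getElem (by simp)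
  intro i h1 h2
  simp [List.getD_eq_getElem?_getD, List.getElem?_eq_getElem h2]

theorem foldl_getD_range {α β : Type} (l : List α) (d : α) (F : β → α → β) (s : β) :
    (List.range l.length).foldl (fun s i => F s (l.getD i d)) s = l.foldl F s := by
  rw [← List.foldl_map]; rw [map_getD_range]

theorem foldl_append_singleton {α : Type} (l : List α) (c : List α) :
    l.foldl (fun c x => c ++ [x]) c = c ++ l := by
  induction l generalizing c with
  | nil => simp
  | cons x xs ih => simp [List.foldl_cons, ih]

-- the threaded seen/result pair stays equal componentwise
theorem foldl_dedupStep (xs : List (List String)) (s : PySem.Set (List String)) :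
    xs.foldl pvDedupStep (s, s) = (PySem.Set.update s xs, PySem.Set.update s xs) := by
  induction xs generalizing s with
  | nil => simp [PySem.Set.update]
  | cons c cs ih =>
      rw [List.foldl_cons]
      have hstep : pvDedupStep (s, s) c = (PySem.Set.add s c, PySem.Set.add s c) := by
        by_cases h : c ∈ s <;> simp [pvDedupStep, PySem.Set.add, h]
      rw [hstep, ih]
      simp [PySem.Set.update]

-- a conditional dedup loop is the dedup fold over the filtered, mapped list
theorem foldl_if_dedupStep {α : Type} (l : List α) (p : α → Bool) (g : α → List String)
    (st : PySem.Set (List String) × List (List String)) :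
    l.foldl (fun st x => if p x then pvDedupStep st (g x) else st) st
      = ((l.filter p).map g).foldl pvDedupStep st := by
  induction l generalizing st with
  | nil => simp
  | cons x xs ih =>
      by_cases h : p x = true <;> simp [h, ih]

-- the classification fold is a pair of filters
theorem classify_eq_filters (flags : List String) (b o : List String) :
    flags.foldl
      (fun (p : List String × List String) f =>
        if pyAlwaysOn.contains f then (p.1, p.2 ++ [f])
        else if pyAlwaysOff.contains f then p
        else (p.1 ++ [f], p.2)) (b, o)
    = (b ++ flags.filter (fun f => !pyAlwaysOn.contains f && !pyAlwaysOff.contains f),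
       o ++ flags.filter (fun f => pyAlwaysOn.contains f)) := by
  induction flags generalizing b o with
  | nil => simp
  | cons f fs ih =>
      rw [List.foldl_cons]
      by_cases h1 : pyAlwaysOn.contains f = true
      · have h1' : f ∈ pyAlwaysOn := List.contains_iff_mem.mp h1
        rw [if_pos h1, ih]
        simp [h1']
      · have h1' : f ∉ pyAlwaysOn := fun h => h1 (List.contains_iff_mem.mpr h)
        by_cases h2 : pyAlwaysOff.contains f = true
        · have h2' : f ∈ pyAlwaysOff := List.contains_iff_mem.mp h2
          rw [if_neg h1, if_pos h2, ih]
          simp [h1', h2']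
        · have h2' : f ∉ pyAlwaysOff := fun h => h2 (List.contains_iff_mem.mpr h)
          rw [if_neg h1, if_neg h2, ih]
          simp [h1', h2']


-- A's inner bit loop, as a function of the mask i
def pvSubsetA (base : List String) (i : ℕ) : List String :=
  (List.range base.length).foldl
    (fun c j => if i.testBit j then c ++ [base.getD j ""] else c) []

theorem subsetA_snoc (bs : List String) (f : String) (i : ℕ) :
    pvSubsetA (bs ++ [f]) i
      = (if i.testBit bs.length then pvSubsetA bs i ++ [f] else pvSubsetA bs i) := by
  unfold pvSubsetA
  rw [show (bs ++ [f]).length = bs.length + 1 by simp, List.range_succ, List.foldl_append]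
  have hcongr : ∀ (c : List String),
      (List.range bs.length).foldl
        (fun c j => if i.testBit j then c ++ [(bs ++ [f]).getD j ""] else c) c
      = (List.range bs.length).foldl
        (fun c j => if i.testBit j then c ++ [bs.getD j ""] else c) c := by
    intro c
    apply PySem.List.foldl_congr_mem
    intro acc j hj
    have : j < bs.length := List.mem_range.mp hj
    simp [List.getElem?_append_left this]
  rw [hcongr]
  simp

theorem testBit_high_of_lt {i n : ℕ} (h : i < 2 ^ n) : i.testBit n = false :=
  Nat.testBit_lt_two_pow h

-- the doubling fold enumerates exactly A's bit-mask subsets, in mask order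
theorem doubling_eq_masks (base : List String) :
    base.foldl (fun ss f => ss ++ ss.map (fun t => t ++ [f])) [[]]
      = (List.range (2 ^ base.length)).map (pvSubsetA base) := by
  induction base using List.reverseRecOn with
  | nil => simp [pvSubsetA]
  | append_singleton bs f ih =>
      rw [List.foldl_append, List.foldl_cons, List.foldl_nil, ih]
      have hlen : (bs ++ [f]).length = bs.length + 1 := by simp
      rw [hlen, pow_succ, mul_two, List.range_add]
      rw [List.map_append, List.map_map, List.map_map]
      congr 1
      · apply List.map_congr_left
        intro i hi
        have hi' : i < 2 ^ bs.length := List.mem_range.mp hi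
        rw [subsetA_snoc, testBit_high_of_lt hi']
        simp
      · apply List.map_congr_left
        intro i hi
        have hi' : i < 2 ^ bs.length := List.mem_range.mp hi
        simp only [Function.comp]
        rw [subsetA_snoc]
        have hbit : (2 ^ bs.length + i).testBit bs.length = true := by
          have := Nat.testBit_two_pow_add_eq i bs.length
          rw [this, testBit_high_of_lt hi']
          rfl
        have hsub : pvSubsetA bs (2 ^ bs.length + i) = pvSubsetA bs i := by
          unfold pvSubsetA
          apply PySem.List.foldl_congr_mem
          intro acc j hj
          have hjlt : j < bs.length := List.mem_range.mp hj
          rw [Nat.testBit_two_pow_add_gt hjlt]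
        rw [hbit, hsub]
        simp

-- the closed `separate` index loops evaluate to the concatenated constant lists
theorem sep_fold :
    (List.range pyAlwaysOff.length).foldl
      (fun acc idx => acc ++ [pyAlwaysOff.getD idx ""])
      ((List.range pyAlwaysOn.length).foldl
        (fun acc idx => acc ++ [pyAlwaysOn.getD idx ""]) [])
    = pyAlwaysOn ++ pyAlwaysOff := by decide

-- A's classification index loop, as the two filters B uses
theorem classify_range (flags : List String) :
    (List.range flags.length).foldl
      (fun (p : List String × List String) idx =>
        if pyAlwaysOn.contains (flags.getD idx "") then (p.1, p.2 ++ [flags.getD idx ""])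
        else if pyAlwaysOff.contains (flags.getD idx "") then p
        else (p.1 ++ [flags.getD idx ""], p.2)) ([], [])
    = (flags.filter (fun f => !pyAlwaysOn.contains f && !pyAlwaysOff.contains f),
       flags.filter (fun f => pyAlwaysOn.contains f)) := by
  have h := foldl_getD_range flags ""
    (fun (p : List String × List String) f =>
      if pyAlwaysOn.contains f then (p.1, p.2 ++ [f])
      else if pyAlwaysOff.contains f then p
      else (p.1 ++ [f], p.2)) (([], []))
  refine h.trans ?_
  rw [classify_eq_filters]
  simp

-- A's singleton index loop, as a dedup fold over the filtered singleton list
theorem singles_range (flags : List String)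
    (st : PySem.Set (List String) × List (List String)) :
    (List.range flags.length).foldl
      (fun st idx =>
        if (pyAlwaysOn ++ pyAlwaysOff).contains (flags.getD idx "") then
          pvDedupStep st [flags.getD idx ""]
        else st) st
    = ((flags.filter (fun f => (pyAlwaysOn ++ pyAlwaysOff).contains f)).map
        (fun f => [f])).foldl pvDedupStep st := by
  have h := foldl_getD_range flags ""
    (fun st f => if (pyAlwaysOn ++ pyAlwaysOff).contains f then pvDedupStep st [f] else st) st
  exact h.trans (foldl_if_dedupStep flags _ _ st)

-- A's bit-mask loop, as a dedup fold over B's doubling subsets (each extended by `on`)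
theorem masks_range (base on : List String)
    (st : PySem.Set (List String) × List (List String)) :
    (List.range (2 ^ base.length)).foldl
      (fun st i => pvDedupStep st
        ((List.range on.length).foldl (fun c k => c ++ [on.getD k ""])
          ((List.range base.length).foldl
            (fun c j => if i.testBit j then c ++ [base.getD j ""] else c) []))) st
    = ((base.foldl (fun ss f => ss ++ ss.map (fun t => t ++ [f])) [[]]).map
        (fun t => t ++ on)).foldl pvDedupStep st := by
  have hb : ∀ (st' : PySem.Set (List String) × List (List String)) (i : ℕ),
      pvDedupStep st'
        ((List.range on.length).foldl (fun c k => c ++ [on.getD k ""])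
          ((List.range base.length).foldl
            (fun c j => if i.testBit j then c ++ [base.getD j ""] else c) []))
      = pvDedupStep st' (pvSubsetA base i ++ on) := by
    intro st' i
    have h := foldl_getD_range on "" (fun c x => c ++ [x]) (pvSubsetA base i)
    exact congrArg _ (h.trans (foldl_append_singleton on _))
  refine (PySem.List.foldl_congr_mem (List.range (2 ^ base.length)) _ _ st (fun acc i _ => hb acc i)).trans ?_
  rw [doubling_eq_masks, List.map_map, List.foldl_map]
  rfl

-- ===== VERDICT (by name: the statement is the Claim_ definition above) =====
theorem flag_combinations_spec : Claim_equal_flag_combinations := by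
  intro flags _
  unfold Spec_flag_combinations
  simp only [flag_combinations, flag_combinations_alt]
  rw [sep_fold, classify_range]
  dsimp only
  rw [singles_range, masks_range, ← List.foldl_append]
  have h0 : (PySem.Set.add PySem.Set.empty ([] : List String),
      ([[]] : List (List String)))
      = ((([[]] : List (List String)) : PySem.Set (List String)),
         ([[]] : List (List String))) := by decide
  rw [h0, foldl_dedupStep]
  simp only [PySem.List.dedup_eq_ofList, PySem.Set.ofList_eq_foldl]
  rfl
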